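-- pv_equiv track=rewrite | github.com/Amathlog/AdventOfCode | aoc/2024/Day7/solution.py | recurse
-- ===== SOURCE A (Python) =====
-- from typing import List, Tuple
--
-- def concat(left: int, right: int) -> int:
--     return int(str(left) + str(right))
--
-- def recurse(left: int, right: List[int], curr: int, use_concat: bool) -> bool:
--     if len(right) == 0:
--         return left == curr
--
--     temp = curr * right[0]
--     if temp <= left and recurse(left, right[1:], temp, use_concat):
--         return True
--
--     temp = curr + right[0]
--     if temp <= left and recurse(left, right[1:], temp, use_concat):
--         return True
--
--     if use_concat:
--         temp = concat(curr, right[0])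
--         if temp <= left and recurse(left, right[1:], temp, use_concat):
--             return True
--
--     return False
-- ===== SOURCE B (Python) =====
-- from typing import List
--
--
-- def concat(left: int, right: int) -> int:
--     return int(str(left) + str(right))
--
--
-- def recurse(left: int, right: List[int], curr: int, use_concat: bool) -> bool:
--     # Explicit-stack iterative DFS instead of recursion; concat is deferred via
--     # marker frames so candidates are evaluated in the same order as the recursion.
--     stack = [(False, right, curr, 0)]
--     while stack:
--         mark, rest, v, n = stack.pop()
--         if mark:
--             t = concat(v, n)
--             if t <= left:
--                 stack.append((False, rest, t, 0))
--             continue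
--         if not rest:
--             if v == left:
--                 return True
--             continue
--         n = rest[0]
--         tail = rest[1:]
--         if use_concat:
--             stack.append((True, tail, v, n))
--         t = v + n
--         if t <= left:
--             stack.append((False, tail, t, 0))
--         t = v * n
--         if t <= left:
--             stack.append((False, tail, t, 0))
--     return False
-- ===== Notes on version B (the rewrite author's own statement) =====
-- stated objective: alternative
-- what changed: Replaces the recursive DFS with an iterative explicit-stack DFS whose deferred-concat marker frames reproduce the recursion's traversal and evaluation order exactly (same values, same raises).
-- outside the precondition, e.g. on recurse(2, [-2], -1, True): A returns True, B returns True; on recurse(10, [-2], 1, True): A raises ValueError, B raises ValueError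
import Mathlib
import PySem

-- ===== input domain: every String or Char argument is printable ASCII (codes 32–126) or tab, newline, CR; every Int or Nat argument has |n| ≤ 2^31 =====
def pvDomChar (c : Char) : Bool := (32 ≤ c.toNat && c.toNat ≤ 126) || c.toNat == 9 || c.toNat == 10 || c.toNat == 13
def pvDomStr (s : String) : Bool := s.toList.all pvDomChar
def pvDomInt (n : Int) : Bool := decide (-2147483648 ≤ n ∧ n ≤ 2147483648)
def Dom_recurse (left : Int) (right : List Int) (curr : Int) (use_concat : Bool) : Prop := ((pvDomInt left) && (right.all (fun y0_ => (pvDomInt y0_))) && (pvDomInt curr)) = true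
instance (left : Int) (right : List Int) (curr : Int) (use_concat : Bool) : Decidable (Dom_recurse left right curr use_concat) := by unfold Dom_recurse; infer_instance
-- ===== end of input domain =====

-- B replaces the recursive DFS by an explicit-stack iterative DFS with deferred concat marker
-- frames (alternative decomposition, same candidate order and values); return value only.

-- ===== PORT A =====
-- concat(left, right) = int(str(left) + str(right)); Python raises ValueError when the joined
-- string is not an int literal (right < 0); PySem.Int.ofChars? returns none there and the .getD 0
-- is never relied on inside Pre_.
def pyConcat (l r : Int) : Int :=
  (PySem.Int.ofChars? (PySem.Int.toChars l ++ PySem.Int.toChars r)).getD 0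

-- The Python 'if cond: return True' chain is ported as short-circuit ||, branches in source order.
def recurse (left : Int) (right : List Int) (curr : Int) (use_concat : Bool) : Bool :=
  match right with
  | [] => decide (left = curr)
  | r :: rest =>
    (decide (curr * r ≤ left) && recurse left rest (curr * r) use_concat) ||
    (decide (curr + r ≤ left) && recurse left rest (curr + r) use_concat) ||
    (use_concat && (decide (pyConcat curr r ≤ left) && recurse left rest (pyConcat curr r) use_concat))

-- ===== PORT B =====
-- A stack frame (mark, rest, v, n): mark = true is a deferred-concat marker; weight for termination.
def pvFrameW (f : Bool × List Int × Int × Int) : Nat :=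
  if f.1 then 2 * 4 ^ f.2.1.length + 1 else 2 * 4 ^ f.2.1.length

def pvStackW (st : List (Bool × List Int × Int × Int)) : Nat := (st.map pvFrameW).sum

-- the three ways one loop iteration shrinks the stack weight (cited by decreasing_by)
lemma pvW_marker_lt (rest : List Int) (v t n : Int) (s : List (Bool × List Int × Int × Int)) :
    pvStackW ((false, rest, t, 0) :: s) < pvStackW ((true, rest, v, n) :: s) := by
  simp [pvStackW, pvFrameW]

lemma pvW_tail_lt (f : Bool × List Int × Int × Int) (s : List (Bool × List Int × Int × Int)) :
    pvStackW s < pvStackW (f :: s) := by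
  have h : 0 < pvFrameW f := by
    unfold pvFrameW
    have : 0 < 4 ^ f.2.1.length := Nat.pow_pos (by omega)
    split_ifs <;> omega
  simp only [pvStackW, List.map_cons, List.sum_cons]
  omega

lemma pvW_expand_lt (left v n' x : Int) (uc : Bool) (tail : List Int)
    (s : List (Bool × List Int × Int × Int)) :
    pvStackW ((if v * n' ≤ left then [((false : Bool), tail, v * n', (0 : Int))] else []) ++
       (if v + n' ≤ left then [((false : Bool), tail, v + n', (0 : Int))] else []) ++
       (if uc = true then [((true : Bool), tail, v, n')] else []) ++ s) <
      pvStackW ((false, n' :: tail, v, x) :: s) := by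
  have h4 : 1 ≤ 4 ^ tail.length := Nat.one_le_pow _ _ (by omega)
  split_ifs <;> simp [pvStackW, pvFrameW, pow_succ] <;> omega

-- the while loop of Source B, one recursive call per iteration; the guarded pushes of one
-- iteration become the (possibly empty) singleton lists prepended to the stack.
def recurse_alt_loop (left : Int) (use_concat : Bool) :
    List (Bool × List Int × Int × Int) → Bool
  | [] => false
  | (true, rest, v, n) :: s =>
    if pyConcat v n ≤ left then
      recurse_alt_loop left use_concat ((false, rest, pyConcat v n, 0) :: s)
    else recurse_alt_loop left use_concat s
  | (false, [], v, _) :: s =>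
    if v = left then true else recurse_alt_loop left use_concat s
  | (false, n' :: tail, v, _) :: s =>
    recurse_alt_loop left use_concat
      ((if v * n' ≤ left then [((false : Bool), tail, v * n', (0 : Int))] else []) ++
       (if v + n' ≤ left then [((false : Bool), tail, v + n', (0 : Int))] else []) ++
       (if use_concat = true then [((true : Bool), tail, v, n')] else []) ++ s)
  termination_by st => pvStackW st
  decreasing_by
  · exact pvW_marker_lt ..
  · exact pvW_tail_lt ..
  · exact pvW_tail_lt ..
  · exact pvW_expand_lt ..

def recurse_alt (left : Int) (right : List Int) (curr : Int) (use_concat : Bool) : Bool :=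
  recurse_alt_loop left use_concat [(false, right, curr, 0)]

-- ===== PRECONDITION & SPEC =====
-- Pre_ excludes use_concat = true with a negative element in right: there every evaluated concat
-- raises ValueError in Python, so on those inputs A either raises or returns True through an
-- earlier branch — and B, reproducing A's traversal and evaluation order exactly, does the very
-- same (it returns True / raises precisely where A does); the region is excluded only because the
-- raising subset is path-dependent and a faithful raising port is not expressible, not because B
-- disagrees with A anywhere.
def Pre_recurse (left : Int) (right : List Int) (curr : Int) (use_concat : Bool) : Prop :=
  use_concat = true → ∀ n ∈ right, 0 ≤ n
instance (left : Int) (right : List Int) (curr : Int) (use_concat : Bool) : Decidable (Pre_recurse left right curr use_concat) := by unfold Pre_recurse; infer_instance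

def pvWitness_recurse : Int × List Int × Int × Bool := (10, [2, 3], 1, true)

def Spec_recurse (left : Int) (right : List Int) (curr : Int) (use_concat : Bool) (out : Bool) : Prop := out = recurse_alt left right curr use_concat
instance (left : Int) (right : List Int) (curr : Int) (use_concat : Bool) (out : Bool) : Decidable (Spec_recurse left right curr use_concat out) := by unfold Spec_recurse; infer_instance

-- ===== CLAIM (what is proved, stated in full; the proofs are below) =====
def Claim_equal_recurse : Prop := ∀ (left : Int) (right : List Int) (curr : Int) (use_concat : Bool), Dom_recurse left right curr use_concat → Pre_recurse left right curr use_concat → Spec_recurse left right curr use_concat (recurse left right curr use_concat)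

-- ===== LEMMAS AND PROOFS =====

-- the value a single frame contributes, in terms of A's recursion
def pvFrameVal (left : Int) (uc : Bool) (f : Bool × List Int × Int × Int) : Bool :=
  match f with
  | (true, rest, v, n) =>
      decide (pyConcat v n ≤ left) && recurse left rest (pyConcat v n) uc
  | (false, rest, v, _) => recurse left rest v uc

-- the loop returns true iff some frame on the stack succeeds
lemma loop_any (left : Int) (uc : Bool) :
    ∀ st, recurse_alt_loop left uc st = st.any (pvFrameVal left uc) := by
  intro st
  induction st using recurse_alt_loop.induct left uc with
  | case1 => simp [recurse_alt_loop]
  | case2 rest v n s ht ih =>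
    rw [recurse_alt_loop, if_pos ht, ih]
    simp [pvFrameVal, ht]
  | case3 rest v n s ht ih =>
    rw [recurse_alt_loop, if_neg ht, ih]
    simp [pvFrameVal, ht]
  | case4 snd s =>
    rw [recurse_alt_loop]
    simp [pvFrameVal, recurse]
  | case5 v snd s hv ih =>
    rw [recurse_alt_loop, if_neg hv, ih]
    have h' : ¬ left = v := fun h => hv h.symm
    simp [pvFrameVal, recurse, h']
  | case6 n' tail v snd s ih =>
    simp only [dite_eq_ite] at ih
    rw [recurse_alt_loop, ih]
    simp only [List.any_append, List.any_cons, pvFrameVal, recurse]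
    by_cases h1 : v * n' ≤ left <;> by_cases h2 : v + n' ≤ left <;>
      cases uc <;> simp [pvFrameVal, Bool.or_assoc, h1, h2]

-- ===== VERDICT (by name: the statement is the Claim_ definition above) =====
theorem recurse_spec : Claim_equal_recurse := by
  intro left right curr uc _ _
  unfold Spec_recurse recurse_alt
  rw [loop_any]
  simp [pvFrameVal]
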